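-- pv_equiv track=rewrite | github.com/rokib97/learn-code-in-python | loop.py | meditate
-- ===== SOURCE A (Python) =====
-- def meditate(mana, max_mana, energy, energy_drinks):
--     while mana < max_mana and (energy > 0 or energy_drinks > 0):
--         if energy > 0:
--             mana += 1
--             energy += 1
--         elif energy_drinks > 0:
--             energy += 50
--             energy_drinks -= 1
--     return mana, energy, energy_drinks
-- ===== SOURCE B (Python) =====
-- def meditate(mana, max_mana, energy, energy_drinks):
--     if mana < max_mana:
--         if energy <= 0 and energy_drinks > 0:
--             k = min(energy_drinks, (50 - energy) // 50)
--             energy += 50 * k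
--             energy_drinks -= k
--         if energy > 0:
--             energy += max_mana - mana
--             mana = max_mana
--     return mana, energy, energy_drinks
-- ===== Notes on version B (the rewrite author's own statement) =====
-- stated objective: faster
-- what changed: Replaced the step-by-step while loop (one mana point or one drink per iteration) with a closed form: ceil-division computes the number of drinks needed at once, then mana and energy jump directly to their final values.
import Mathlib
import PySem

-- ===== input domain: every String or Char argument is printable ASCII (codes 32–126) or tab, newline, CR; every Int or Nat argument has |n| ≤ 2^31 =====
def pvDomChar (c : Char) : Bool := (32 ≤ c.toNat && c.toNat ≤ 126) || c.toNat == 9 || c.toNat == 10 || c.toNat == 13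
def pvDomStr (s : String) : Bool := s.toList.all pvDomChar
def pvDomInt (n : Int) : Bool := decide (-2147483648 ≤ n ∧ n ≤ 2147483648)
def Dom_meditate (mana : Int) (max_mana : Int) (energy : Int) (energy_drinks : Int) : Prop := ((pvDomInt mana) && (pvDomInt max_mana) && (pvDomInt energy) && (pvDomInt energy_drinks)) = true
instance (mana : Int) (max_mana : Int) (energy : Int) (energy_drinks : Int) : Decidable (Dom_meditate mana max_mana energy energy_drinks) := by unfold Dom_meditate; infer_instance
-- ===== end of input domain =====

-- B replaces A's one-unit-per-iteration while loop by an O(1) closed form (ceil division for the drinks, one jump for mana/energy).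

-- ===== PORT A =====
-- literal transliteration of A's while loop; the final inner else is unreachable
-- (the guard forces energy > 0 ∨ energy_drinks > 0, and Python's no-op body keeps the state unchanged there)
def meditate (mana : Int) (max_mana : Int) (energy : Int) (energy_drinks : Int) : List Int :=
  if _h : mana < max_mana ∧ (energy > 0 ∨ energy_drinks > 0) then
    if energy > 0 then
      meditate (mana + 1) max_mana (energy + 1) energy_drinks
    else if energy_drinks > 0 then
      meditate mana max_mana (energy + 50) (energy_drinks - 1)
    else
      [mana, energy, energy_drinks]
  else
    [mana, energy, energy_drinks]
termination_by (max_mana - mana).toNat + energy_drinks.toNat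
decreasing_by
  · omega
  · omega

-- ===== PORT B =====
def meditate_alt (mana : Int) (max_mana : Int) (energy : Int) (energy_drinks : Int) : List Int :=
  if mana < max_mana then
    let (energy, energy_drinks) :=
      if energy ≤ 0 ∧ energy_drinks > 0 then
        let k := min energy_drinks (PySem.Int.floordiv (50 - energy) 50)
        (energy + 50 * k, energy_drinks - k)
      else (energy, energy_drinks)
    if energy > 0 then
      [max_mana, energy + (max_mana - mana), energy_drinks]
    else
      [mana, energy, energy_drinks]
  else
    [mana, energy, energy_drinks]

-- ===== PRECONDITION & SPEC =====
def Spec_meditate (mana : Int) (max_mana : Int) (energy : Int) (energy_drinks : Int) (out : List Int) : Prop := out = meditate_alt mana max_mana energy energy_drinks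
instance (mana : Int) (max_mana : Int) (energy : Int) (energy_drinks : Int) (out : List Int) : Decidable (Spec_meditate mana max_mana energy energy_drinks out) := by unfold Spec_meditate; infer_instance

-- ===== CLAIM (what is proved, stated in full; the proofs are below) =====
def Claim_equal_meditate : Prop := ∀ (mana : Int) (max_mana : Int) (energy : Int) (energy_drinks : Int), Dom_meditate mana max_mana energy energy_drinks → Spec_meditate mana max_mana energy energy_drinks (meditate mana max_mana energy energy_drinks)

-- ===== LEMMAS AND PROOFS =====

theorem meditate_eq_alt (mana max_mana energy energy_drinks : Int) :
    meditate mana max_mana energy energy_drinks = meditate_alt mana max_mana energy energy_drinks := by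
  fun_induction meditate mana max_mana energy energy_drinks with
  | case1 m e d h he ih =>
    rw [ih]
    simp only [meditate_alt, PySem.Int.floordiv_eq_ediv_of_pos (by norm_num : (0:Int) < 50),
      min_def]
    split_ifs <;> simp <;> omega
  | case2 m e d h he hd ih =>
    rw [ih]
    simp only [meditate_alt, PySem.Int.floordiv_eq_ediv_of_pos (by norm_num : (0:Int) < 50),
      min_def]
    split_ifs <;> simp <;> omega
  | case3 m e d h he hd =>
    exact absurd h.2 (by omega)
  | case4 m e d h =>
    simp only [meditate_alt, PySem.Int.floordiv_eq_ediv_of_pos (by norm_num : (0:Int) < 50),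
      min_def]
    split_ifs <;> simp <;> omega

-- ===== VERDICT (by name: the statement is the Claim_ definition above) =====
theorem meditate_spec : Claim_equal_meditate := by
  intro mana max_mana energy energy_drinks _
  unfold Spec_meditate
  exact meditate_eq_alt mana max_mana energy energy_drinks
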